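-- pv_equiv track=rewrite | github.com/macs-sc/game-of-codes-2025 | C/hack.py | solve
-- ===== SOURCE A (Python) =====
-- MOD = 1_000_000_007
--
-- def solve(n, m):
--     if n > m: return -1
--
--     two = 1
--     while two < n: two <<= 1
--
--     result = 0
--     if two != n: result = two - n
--
--     while two < m:
--         two <<= 1
--         result += 1
--
--     return result % MOD
-- ===== SOURCE B (Python) =====
-- MOD = 1_000_000_007
--
-- def solve(n, m):
--     if n > m:
--         return -1
--     two = 1 if n <= 1 else 1 << (n - 1).bit_length()
--     pm = 1 if m <= 1 else 1 << (m - 1).bit_length()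
--     count = pm.bit_length() - two.bit_length()
--     return (two - n + count) % MOD
-- ===== Notes on version B (the rewrite author's own statement) =====
-- stated objective: alternative
-- what changed: Both doubling while-loops are replaced by closed-form bit_length arithmetic: the smallest power of two >= x is 1 << (x-1).bit_length() (1 for x <= 1), and the doubling count is the difference of the two powers' bit_lengths, so B is loop-free O(1) bit arithmetic.
import Mathlib
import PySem

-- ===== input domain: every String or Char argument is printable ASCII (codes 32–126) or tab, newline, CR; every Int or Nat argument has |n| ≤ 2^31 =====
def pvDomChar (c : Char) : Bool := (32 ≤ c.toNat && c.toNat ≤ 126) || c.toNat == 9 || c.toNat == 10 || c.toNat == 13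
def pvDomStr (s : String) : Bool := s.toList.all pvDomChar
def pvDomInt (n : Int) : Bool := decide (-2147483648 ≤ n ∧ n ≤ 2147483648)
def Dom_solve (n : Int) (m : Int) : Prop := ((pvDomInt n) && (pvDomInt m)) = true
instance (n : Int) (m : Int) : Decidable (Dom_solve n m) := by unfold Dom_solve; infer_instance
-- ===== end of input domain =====

-- B replaces both doubling while-loops by closed-form bit_length arithmetic (alternative O(1) bit formula).

-- ===== PORT A =====
def MOD : Int := 1000000007

-- `while two < n: two <<= 1`; fuel only bounds the iteration count (the loop adds at least 1
-- to `two` per iteration while `two < n`, so `(n-1).toNat` iterations always suffice; proved below).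
def solveLoop1 : Nat -> Int -> Int -> Int
  | 0, two, _ => two
  | fuel + 1, two, n => if two < n then solveLoop1 fuel (2 * two) n else two

-- `while two < m: two <<= 1; result += 1` (only `result` is used afterwards); fuel as above.
def solveLoop2 : Nat -> Int -> Int -> Int -> Int
  | 0, _, _, result => result
  | fuel + 1, two, m, result => if two < m then solveLoop2 fuel (2 * two) m (result + 1) else result

def solve (n : Int) (m : Int) : Int :=
  if n > m then -1
  else
    let two := solveLoop1 (n - 1).toNat 1 n
    let result := if two ≠ n then two - n else 0
    PySem.Int.mod (solveLoop2 (m - two).toNat two m result) MOD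

-- ===== PORT B =====
-- Source B: closed forms; `1 << b` is ported as 2 ^ b (b = a bit_length, a Nat here).
def solve_alt (n : Int) (m : Int) : Int :=
  if n > m then -1
  else
    let two : Int := if n ≤ 1 then 1 else 2 ^ (PySem.Int.bitLength (n - 1))
    let pm : Int := if m ≤ 1 then 1 else 2 ^ (PySem.Int.bitLength (m - 1))
    let count : Int := (PySem.Int.bitLength pm : Int) - (PySem.Int.bitLength two : Int)
    PySem.Int.mod (two - n + count) MOD

-- ===== PRECONDITION & SPEC =====
def Spec_solve (n : Int) (m : Int) (out : Int) : Prop := out = solve_alt n m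
instance (n : Int) (m : Int) (out : Int) : Decidable (Spec_solve n m out) := by unfold Spec_solve; infer_instance

-- ===== CLAIM (what is proved, stated in full; the proofs are below) =====
def Claim_equal_solve : Prop := ∀ (n : Int) (m : Int), Dom_solve n m → Spec_solve n m (solve n m)

-- ===== LEMMAS AND PROOFS =====

-- the exponent of the smallest power of two ≥ x (0 for x ≤ 1)
def minExp (x : Int) : Nat := if x ≤ 1 then 0 else PySem.Int.bitLength (x - 1)

theorem le_pow_minExp (x : Int) : x ≤ 2 ^ minExp x := by
  unfold minExp
  split
  · simpa using ‹x ≤ 1›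
  · have h1 : (1:Int) < x := by omega
    have := PySem.Int.lt_two_pow_bitLength (x - 1)
    have hna : (x - 1).natAbs = (x - 1).toNat := by omega
    rw [hna] at this
    have : ((x-1).toNat : Int) < ((2:Nat) ^ PySem.Int.bitLength (x - 1) : Nat) := by exact_mod_cast this
    push_cast at this ⊢
    omega

theorem minExp_le (x : Int) (j : Nat) (h : x ≤ 2 ^ j) : minExp x ≤ j := by
  unfold minExp
  split
  · omega
  · have h1 : (1:Int) < x := by omega
    by_contra hc
    have hj : j ≤ PySem.Int.bitLength (x - 1) - 1 := by omega
    have hb := PySem.Int.two_pow_bitLength_le (x - 1) (by omega)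
    have hna : (x - 1).natAbs = (x - 1).toNat := by omega
    rw [hna] at hb
    have hmono : (2:Nat) ^ j ≤ 2 ^ (PySem.Int.bitLength (x - 1) - 1) :=
      Nat.pow_le_pow_right (by omega) hj
    have : (2:Nat) ^ j ≤ (x - 1).toNat := le_trans hmono hb
    have : ((2:Nat) ^ j : Int) ≤ x - 1 := by
      have hx : ((x-1).toNat : Int) = x - 1 := by omega
      calc ((2:Nat) ^ j : Int) ≤ ((x-1).toNat : Int) := by exact_mod_cast this
        _ = x - 1 := hx
    push_cast at this
    have hpow : (2:Int) ^ j = ((2:Nat) ^ j : Int) := by push_cast; ring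
    omega

theorem bitLength_two_pow (k : Nat) : PySem.Int.bitLength ((2:Int) ^ k) = k + 1 := by
  have hna : ((2:Int) ^ k).natAbs = 2 ^ k := by
    have : ((2:Int) ^ k) = ((2 ^ k : Nat) : Int) := by push_cast; ring
    rw [this, Int.natAbs_natCast]
  have hne : ((2:Int) ^ k) ≠ 0 := by positivity
  have h1 := PySem.Int.lt_two_pow_bitLength ((2:Int) ^ k)
  have h2 := PySem.Int.two_pow_bitLength_le ((2:Int) ^ k) hne
  rw [hna] at h1 h2
  set b := PySem.Int.bitLength ((2:Int) ^ k) with hb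
  have hkb : k < b := (Nat.pow_lt_pow_iff_right (by omega)).mp h1
  have hbk : b - 1 ≤ k := (Nat.pow_le_pow_iff_right (by omega)).mp h2
  omega

theorem pow_pos' (k : Nat) : (0:Int) < 2 ^ k := by positivity

theorem pow_add_le (k d : Nat) : 2 ^ k + d ≤ 2 ^ (k + d) := by
  induction d with
  | zero => simp
  | succ d ih =>
    have h1 : (1:Nat) ≤ 2 ^ (k + d) := Nat.one_le_two_pow
    have h2 : 2 ^ (k + (d + 1)) = 2 ^ (k + d) + 2 ^ (k + d) := by
      rw [show k + (d + 1) = (k + d) + 1 by omega, Nat.pow_succ]; ring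
    omega

theorem minExp_le_self (n : Int) (h : 1 < n) : minExp n ≤ (n - 1).toNat := by
  unfold minExp
  rw [if_neg (by omega)]
  have hb := PySem.Int.two_pow_bitLength_le (n - 1) (by omega)
  have hna : (n - 1).natAbs = (n - 1).toNat := by omega
  rw [hna] at hb
  have hlt : PySem.Int.bitLength (n - 1) - 1 < 2 ^ (PySem.Int.bitLength (n - 1) - 1) :=
    Nat.lt_two_pow_self
  omega

theorem fuel2_enough (k : Nat) (m : Int) (h2 : (2:Int) ^ k < m) :
    minExp m ≤ k + (m - 2 ^ k).toNat := by
  have hm2 : (1:Int) < m := by have := pow_pos' k; omega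
  by_cases hek : minExp m ≤ k
  · omega
  · have he : minExp m = PySem.Int.bitLength (m - 1) := by unfold minExp; rw [if_neg (by omega)]
    set e := PySem.Int.bitLength (m - 1) with hedef
    have hb := PySem.Int.two_pow_bitLength_le (m - 1) (by omega)
    have hna : (m - 1).natAbs = (m - 1).toNat := by omega
    rw [hna, ← hedef] at hb
    -- 2 ^ k + (e - 1 - k) ≤ 2 ^ (e - 1) ≤ (m-1).toNat
    have hke : k ≤ e - 1 := by omega
    have hpl : 2 ^ k + (e - 1 - k) ≤ 2 ^ (e - 1) := by
      have h := pow_add_le k (e - 1 - k)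
      have hkk : k + (e - 1 - k) = e - 1 := by omega
      rw [hkk] at h
      omega
    have hnat : 2 ^ k + (e - 1 - k) ≤ (m - 1).toNat := le_trans hpl hb
    have hint := (Nat.cast_le (α := Int)).mpr hnat
    rw [Nat.cast_add] at hint
    have hc2 : ((2 ^ k : Nat) : Int) = (2:Int) ^ k := by push_cast; ring
    rw [hc2] at hint
    have hm1 : (((m - 1).toNat : Nat) : Int) = m - 1 := by omega
    rw [hm1] at hint
    have hcE : ((e - 1 - k : Nat) : Int) = (e : Int) - 1 - k := by omega
    rw [hcE] at hint
    clear hb hpl hnat hke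
    rw [he]
    omega

theorem loop_noiter1 (fuel : Nat) (two n : Int) (h : ¬ two < n) :
    solveLoop1 fuel two n = two := by
  cases fuel <;> simp [solveLoop1, h]

theorem loop_noiter2 (fuel : Nat) (two m res : Int) (h : ¬ two < m) :
    solveLoop2 fuel two m res = res := by
  cases fuel <;> simp [solveLoop2, h]

theorem loop1_eq (n : Int) :
    ∀ fuel (two : Int) (k : Nat), two = 2 ^ k → minExp n ≤ k + fuel →
      two < n → solveLoop1 fuel two n = 2 ^ minExp n := by
  intro fuel
  induction fuel with
  | zero =>
    intro two k htwo hle hlt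
    exfalso
    have h1 : n ≤ 2 ^ minExp n := le_pow_minExp n
    have h2 : (2:Int) ^ minExp n ≤ 2 ^ k := pow_le_pow_right₀ (by omega) (by omega)
    omega
  | succ fuel ih =>
    intro two k htwo hle hlt
    rw [solveLoop1, if_pos hlt]
    by_cases h2 : 2 * two < n
    · exact ih (2 * two) (k + 1) (by rw [htwo]; ring) (by omega) h2
    · rw [loop_noiter1 fuel (2 * two) n h2]
      have hup : minExp n ≤ k + 1 := by
        apply minExp_le
        have : (2:Int) ^ (k + 1) = 2 * 2 ^ k := by ring
        omega
      have hdown : k < minExp n := by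
        by_contra hc
        have : (2:Int) ^ minExp n ≤ 2 ^ k := pow_le_pow_right₀ (by omega) (by omega)
        have := le_pow_minExp n
        omega
      have : minExp n = k + 1 := by omega
      rw [this, htwo]; ring

theorem loop1_top (n : Int) : solveLoop1 (n - 1).toNat 1 n = 2 ^ minExp n := by
  by_cases hlt : (1:Int) < n
  · exact loop1_eq n (n - 1).toNat 1 0 (by norm_num)
      (by have := minExp_le_self n hlt; omega) hlt
  · rw [loop_noiter1 _ _ _ hlt]
    have h0 : minExp n = 0 := Nat.le_zero.mp (minExp_le n 0 (by norm_num; omega))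
    rw [h0]; norm_num

theorem loop2_eq (m : Int) :
    ∀ fuel (two : Int) (k : Nat) (res : Int), two = 2 ^ k → minExp m ≤ k + fuel →
      two < m → solveLoop2 fuel two m res = res + ((minExp m : Int) - k) := by
  intro fuel
  induction fuel with
  | zero =>
    intro two k res htwo hle hlt
    exfalso
    have h1 : m ≤ 2 ^ minExp m := le_pow_minExp m
    have h2 : (2:Int) ^ minExp m ≤ 2 ^ k := pow_le_pow_right₀ (by omega) (by omega)
    omega
  | succ fuel ih =>
    intro two k res htwo hle hlt
    rw [solveLoop2, if_pos hlt]
    by_cases h2 : 2 * two < m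
    · rw [ih (2 * two) (k + 1) (res + 1) (by rw [htwo]; ring) (by omega) h2]
      have : k < minExp m := by
        by_contra hc
        have : (2:Int) ^ minExp m ≤ 2 ^ k := pow_le_pow_right₀ (by omega) (by omega)
        have := le_pow_minExp m
        omega
      push_cast
      omega
    · rw [loop_noiter2 fuel (2 * two) m (res + 1) h2]
      have hup : minExp m ≤ k + 1 := by
        apply minExp_le
        have : (2:Int) ^ (k + 1) = 2 * 2 ^ k := by ring
        omega
      have hdown : k < minExp m := by
        by_contra hc
        have : (2:Int) ^ minExp m ≤ 2 ^ k := pow_le_pow_right₀ (by omega) (by omega)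
        have := le_pow_minExp m
        omega
      have : minExp m = k + 1 := by omega
      rw [this]; push_cast; ring

-- ===== VERDICT (by name: the statement is the Claim_ definition above) =====
theorem solve_spec : Claim_equal_solve := by
  intro n m _
  unfold Spec_solve solve solve_alt
  by_cases hnm : n > m
  · simp [hnm]
  · rw [if_neg hnm, if_neg hnm]
    have hA : solveLoop1 (n - 1).toNat 1 n = 2 ^ minExp n := loop1_top n
    have htwoB : (if n ≤ 1 then (1:Int) else 2 ^ (PySem.Int.bitLength (n - 1))) = 2 ^ minExp n := by
      unfold minExp; split <;> simp
    have hpmB : (if m ≤ 1 then (1:Int) else 2 ^ (PySem.Int.bitLength (m - 1))) = 2 ^ minExp m := by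
      unfold minExp; split <;> simp
    simp only [hA, htwoB, hpmB]
    have hres : (if (2:Int) ^ minExp n ≠ n then (2:Int) ^ minExp n - n else 0) = 2 ^ minExp n - n := by
      split_ifs with hc
      · rfl
      · omega
    rw [hres]
    have hle_n := le_pow_minExp n
    have hle_m := le_pow_minExp m
    by_cases hlm : (2:Int) ^ minExp n < m
    · rw [loop2_eq m ((m - 2 ^ minExp n).toNat) (2 ^ minExp n) (minExp n) (2 ^ minExp n - n)
        rfl (fuel2_enough (minExp n) m hlm) hlm]
      rw [bitLength_two_pow, bitLength_two_pow]
      push_cast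
      ring_nf
    · rw [loop_noiter2 _ _ _ _ hlm]
      have h1 : minExp m ≤ minExp n := minExp_le m (minExp n) (by omega)
      have h2 : minExp n ≤ minExp m := minExp_le n (minExp m) (by omega)
      have : minExp m = minExp n := by omega
      rw [bitLength_two_pow, bitLength_two_pow, this]
      push_cast
      ring_nf
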